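-- pv_equiv track=rewrite | github.com/HimanshuLadva/Python-DSA | Leetcode/daily/202603/20260324.py | constructProductMatrixV1
-- ===== SOURCE A (Python) =====
-- from typing import List
--
-- def constructProductMatrixV1(grid: List[List[int]]) -> List[List[int]]:
--     MOD = 12345
--     m, n = len(grid), len(grid[0])
--
--     result = [[1]*n for _ in range(m)]
--
--     # Prefix pass
--     prefix = 1
--     for i in range(m):
--         for j in range(n):
--             result[i][j] = prefix
--             prefix = (prefix * grid[i][j]) % MOD
--
--     # Suffix pass
--     suffix = 1
--     for i in reversed(range(m)):
--         for j in reversed(range(n)):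
--             result[i][j] = (result[i][j] * suffix) % MOD
--             suffix = (suffix * grid[i][j]) % MOD
--
--     return result
-- ===== SOURCE B (Python) =====
-- from typing import List
--
-- def constructProductMatrixV1(grid: List[List[int]]) -> List[List[int]]:
--     MOD = 12345
--     m, n = len(grid), len(grid[0])
--     arr = [grid[i][j] for i in range(m) for j in range(n)]
--     L = m * n
--     out = []
--     for i in range(m):
--         row = []
--         for j in range(n):
--             k = i * n + j
--             p = 1
--             for t in range(L):
--                 if t != k:
--                     p = p * arr[t] % MOD
--             row.append(p)
--         out.append(row)
--     return out
-- ===== Notes on version B (the rewrite author's own statement) =====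
-- stated objective: alternative
-- what changed: B drops A's running prefix/suffix accumulators entirely: for every cell it recomputes the product of all other cells directly with one fold over the flattened matrix that skips that cell's index (brute force, O((mn)^2) multiplications vs A's two O(mn) passes).
import Mathlib
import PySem

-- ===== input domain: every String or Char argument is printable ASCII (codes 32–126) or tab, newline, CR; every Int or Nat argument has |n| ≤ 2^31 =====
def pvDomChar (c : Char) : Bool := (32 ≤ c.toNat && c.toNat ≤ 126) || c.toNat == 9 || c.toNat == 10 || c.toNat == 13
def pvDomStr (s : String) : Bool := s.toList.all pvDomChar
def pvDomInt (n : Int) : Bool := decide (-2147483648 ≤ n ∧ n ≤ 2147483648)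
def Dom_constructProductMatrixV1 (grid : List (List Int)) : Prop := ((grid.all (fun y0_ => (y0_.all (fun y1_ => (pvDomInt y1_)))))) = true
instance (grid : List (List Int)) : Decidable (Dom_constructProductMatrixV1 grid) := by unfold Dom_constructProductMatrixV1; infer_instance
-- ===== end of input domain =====

-- B replaces A's two running-accumulator passes by a per-cell brute force: each cell is the
-- product of all other cells, recomputed from scratch by one fold over the flattened matrix
-- that skips that cell's index (objective: alternative — same results, no shared state).

-- ===== PORT A =====
-- result[i][j] = v  (loop indices are nonnegative and in range)
def pvSet2 (res : List (List Int)) (i j : Int) (v : Int) : List (List Int) :=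
  res.set i.toNat ((res.getD i.toNat []).set j.toNat v)

def constructProductMatrixV1 (grid : List (List Int)) : List (List Int) :=
  let m : Int := grid.length
  let n : Int := (grid.headD []).length   -- grid[0]; Pre_ excludes the empty grid (IndexError)
  let init : List (List Int) := List.replicate grid.length (List.replicate (grid.headD []).length (1 : Int))
  -- prefix pass
  let p1 : List (List Int) × Int :=
    (PySem.List.pyRange 0 m 1).foldl (fun st i =>
      (PySem.List.pyRange 0 n 1).foldl (fun (st : List (List Int) × Int) j =>
        (pvSet2 st.1 i j st.2,
         PySem.Int.mod (st.2 * PySem.List.pyGetD (PySem.List.pyGetD grid i []) j 0) 12345)) st)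
      (init, 1)
  -- suffix pass
  let p2 : List (List Int) × Int :=
    ((PySem.List.pyRange 0 m 1).reverse).foldl (fun st i =>
      ((PySem.List.pyRange 0 n 1).reverse).foldl (fun (st : List (List Int) × Int) j =>
        (pvSet2 st.1 i j
           (PySem.Int.mod ((PySem.List.pyGetD (PySem.List.pyGetD st.1 i []) j 0) * st.2) 12345),
         PySem.Int.mod (st.2 * PySem.List.pyGetD (PySem.List.pyGetD grid i []) j 0) 12345)) st)
      (p1.1, 1)
  p2.1

-- ===== PORT B =====
def constructProductMatrixV1_alt (grid : List (List Int)) : List (List Int) :=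
  let m : Int := grid.length
  let n : Int := (grid.headD []).length   -- grid[0]; Pre_ excludes the empty grid (IndexError)
  let arr : List Int :=
    (PySem.List.pyRange 0 m 1).flatMap (fun i =>
      (PySem.List.pyRange 0 n 1).map (fun j => PySem.List.pyGetD (PySem.List.pyGetD grid i []) j 0))
  let L : Int := m * n
  (PySem.List.pyRange 0 m 1).foldl (fun out i =>
    out ++ [(PySem.List.pyRange 0 n 1).foldl (fun row j =>
      row ++ [(PySem.List.pyRange 0 L 1).foldl (fun p t =>
        if t ≠ i * n + j then PySem.Int.mod (p * PySem.List.pyGetD arr t 0) 12345 else p) 1]) []]) []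

-- ===== PRECONDITION & SPEC =====
-- Pre_ excludes exactly the inputs where A raises IndexError: the empty grid (grid[0]),
-- and grids in which some row is shorter than the first row (grid[i][j] for j < len(grid[0])).
def Pre_constructProductMatrixV1 (grid : List (List Int)) : Prop :=
  grid ≠ [] ∧ ∀ r ∈ grid, (grid.headD []).length ≤ r.length
instance (grid : List (List Int)) : Decidable (Pre_constructProductMatrixV1 grid) := by
  unfold Pre_constructProductMatrixV1; infer_instance

def pvWitness_constructProductMatrixV1 : List (List Int) := [[2, 3], [4, 5]]

def Spec_constructProductMatrixV1 (grid : List (List Int)) (out : List (List Int)) : Prop :=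
  out = constructProductMatrixV1_alt grid
instance (grid : List (List Int)) (out : List (List Int)) :
    Decidable (Spec_constructProductMatrixV1 grid out) := by
  unfold Spec_constructProductMatrixV1; infer_instance

-- ===== CLAIM (what is proved, stated in full; the proofs are below) =====
def Claim_equal_constructProductMatrixV1 : Prop :=
  ∀ (grid : List (List Int)), Dom_constructProductMatrixV1 grid →
    Pre_constructProductMatrixV1 grid →
    Spec_constructProductMatrixV1 grid (constructProductMatrixV1 grid)

-- ===== LEMMAS AND PROOFS =====

-- one modular multiplication step
def pvM (a b : Int) : Int := PySem.Int.mod (a * b) 12345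
-- running prefix product (A's `prefix` variable / each step of B's fold)
def pvPreP (p : Int) (xs : List Int) : Int := xs.foldl pvM p
-- running suffix product (A's `suffix` variable)
def pvSufP (s : Int) (xs : List Int) : Int := xs.foldr (fun x acc => pvM acc x) s
-- the row A's prefix pass writes
def pvWrite (p : Int) : List Int → List Int
  | [] => []
  | x :: xs => p :: pvWrite (pvM p x) xs
-- pvT s xs : at each position k, the suffix product of the elements after k
def pvT (s : Int) : List Int → List Int
  | [] => []
  | _ :: xs => pvSufP s xs :: pvT s xs
-- A's suffix pass over one row r (cells of row g), right to left
def pvSufRow (s : Int) : List Int → List Int → List Int × Int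
  | [], r => (r, s)
  | _ :: _, [] => ([], s)
  | x :: xs, v :: vs =>
    let q := pvSufRow s xs vs
    (pvM v q.2 :: q.1, pvM q.2 x)
-- A's prefix pass, row after row
def pvPreRowsL (p : Int) : List (List Int) → List (List Int)
  | [] => []
  | g :: gs => pvWrite p g :: pvPreRowsL (pvPreP p g) gs
-- A's suffix pass, last row first
def pvSufRows (s : Int) : List (List Int) → List (List Int) → List (List Int) × Int
  | [], rs => (rs, s)
  | _ :: _, [] => ([], s)
  | g :: gs, r :: rs =>
    let q := pvSufRows s gs rs
    let w := pvSufRow q.2 g r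
    (w.1 :: q.1, w.2)
-- the effective grid (each row cut to the first row's width) and its row-major flattening
def pvG (grid : List (List Int)) (n : Nat) : List (List Int) := grid.map (fun r => r.take n)

theorem pvWrite_length (p : Int) (xs : List Int) : (pvWrite p xs).length = xs.length := by
  induction xs generalizing p with
  | nil => rfl
  | cons x xs ih => simp [pvWrite, ih]

theorem pvWrite_append (p : Int) (xs ys : List Int) :
    pvWrite p (xs ++ ys) = pvWrite p xs ++ pvWrite (pvPreP p xs) ys := by
  induction xs generalizing p with
  | nil => simp [pvWrite, pvPreP]
  | cons x xs ih => simp [pvWrite, pvPreP, ih, List.foldl_cons]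

theorem pvPreP_append (p : Int) (xs ys : List Int) :
    pvPreP p (xs ++ ys) = pvPreP (pvPreP p xs) ys := by
  simp [pvPreP, List.foldl_append]

theorem pvSufP_append (s : Int) (xs ys : List Int) :
    pvSufP s (xs ++ ys) = pvSufP (pvSufP s ys) xs := by
  simp [pvSufP, List.foldr_append]

theorem pvSufRow_snd (s : Int) (g r : List Int) (h : g.length ≤ r.length) :
    (pvSufRow s g r).2 = pvSufP s g := by
  induction g generalizing r with
  | nil => simp [pvSufRow, pvSufP]
  | cons x xs ih =>
    cases r with
    | nil => simp at h
    | cons v vs =>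
      simp only [List.length_cons, Nat.add_le_add_iff_right] at h
      simp [pvSufRow, pvSufP, ih vs h]

theorem pvSufRow_append (s : Int) (x v : Int) (xs vs : List Int) (h : xs.length = vs.length) :
    pvSufRow s (xs ++ [x]) (vs ++ [v]) =
      ((pvSufRow (pvM s x) xs vs).1 ++ [pvM v s], (pvSufRow (pvM s x) xs vs).2) := by
  induction xs generalizing vs with
  | nil =>
    cases vs with
    | nil => simp [pvSufRow]
    | cons _ _ => simp at h
  | cons y ys ih =>
    cases vs with
    | nil => simp at h
    | cons w ws =>
      simp only [List.length_cons, Nat.add_right_cancel_iff] at h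
      simp [pvSufRow, ih ws h]

theorem pvSufRow_zip (s : Int) (g r : List Int) (h : g.length = r.length) :
    (pvSufRow s g r).1 = List.zipWith pvM r (pvT s g) := by
  induction g generalizing r with
  | nil =>
    cases r with
    | nil => simp [pvSufRow, pvT]
    | cons _ _ => simp at h
  | cons x xs ih =>
    cases r with
    | nil => simp at h
    | cons v vs =>
      simp only [List.length_cons, Nat.add_right_cancel_iff] at h
      simp [pvSufRow, pvT, ih vs h, pvSufRow_snd s xs vs (le_of_eq h)]

-- ===== A-side loop invariants =====

theorem pv_innerPre (g : List Int) (p : Int) (res : List (List Int)) (i : Nat)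
    (hi : i < res.length) (k : Nat) (hk1 : k ≤ (res.getD i []).length) (hk2 : k ≤ g.length) :
    (List.range k).foldl
      (fun (st : List (List Int) × Int) (j : Nat) =>
        (pvSet2 st.1 (i : Int) (j : Int) st.2, pvM st.2 (g.getD j 0)))
      (res, p)
    = (res.set i (pvWrite p (g.take k) ++ (res.getD i []).drop k), pvPreP p (g.take k)) := by
  induction k with
  | zero =>
    simp only [List.range_zero, List.foldl_nil, List.take_zero, pvWrite, pvPreP,
      List.drop_zero, List.nil_append, List.foldl_nil]
    rw [List.getD_eq_getElem res [] hi, List.set_getElem_self hi]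
  | succ k ih =>
    have hkr : k < (res.getD i []).length := hk1
    have hkg : k < g.length := hk2
    have hW : (pvWrite p (g.take k)).length = k := by
      simp [pvWrite_length, Nat.min_eq_left (Nat.le_of_lt hkg)]
    rw [List.range_succ, List.foldl_append, ih (Nat.le_of_lt hkr) (Nat.le_of_lt hkg)]
    simp only [List.foldl_cons, List.foldl_nil, pvSet2, Int.toNat_natCast]
    have hgd : (res.set i (pvWrite p (List.take k g) ++ List.drop k (res.getD i []))).getD i []
        = pvWrite p (List.take k g) ++ List.drop k (res.getD i []) := by
      rw [List.getD_eq_getElem _ [] (by simpa using hi)]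
      exact List.getElem_set_self _
    rw [hgd, List.set_set, List.set_append_right _ _ (le_of_eq hW), hW, Nat.sub_self,
        List.drop_eq_getElem_cons hkr, List.set_cons_zero]
    have ht : List.take (k+1) g = List.take k g ++ [g[k]] := by
      rw [List.take_add_one, List.getElem?_eq_getElem hkg]; simp
    rw [ht, pvWrite_append, pvPreP_append]
    simp [pvWrite, pvPreP, List.getElem?_eq_getElem hkg]

theorem pv_innerSuf (g : List Int) (s : Int) (res : List (List Int)) (i : Nat)
    (hi : i < res.length) (k : Nat) (hk1 : k ≤ (res.getD i []).length) (hk2 : k ≤ g.length) :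
    ((List.range k).reverse).foldl
      (fun (st : List (List Int) × Int) (j : Nat) =>
        (pvSet2 st.1 (i : Int) (j : Int) (pvM ((st.1.getD i []).getD j 0) st.2), pvM st.2 (g.getD j 0)))
      (res, s)
    = (res.set i ((pvSufRow s (g.take k) ((res.getD i []).take k)).1 ++ (res.getD i []).drop k),
       pvSufP s (g.take k)) := by
  revert hi hk1 hk2
  induction k generalizing res s with
  | zero =>
    intro hi _ _
    simp only [List.range_zero, List.reverse_nil, List.foldl_nil, List.take_zero, pvSufRow,
      List.drop_zero, List.nil_append, pvSufP, List.foldr_nil]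
    rw [List.getD_eq_getElem res [] hi, List.set_getElem_self hi]
  | succ k ih =>
    intro hi hk1 hk2
    have hkr : k < (res.getD i []).length := hk1
    have hkg : k < g.length := hk2
    have htakelen : (g.take k).length = ((res.getD i []).take k).length := by
      rw [List.length_take, List.length_take, Nat.min_eq_left (Nat.le_of_lt hkg),
        Nat.min_eq_left (Nat.le_of_lt hkr)]
    rw [List.range_succ, List.reverse_append]
    simp only [List.reverse_cons, List.reverse_nil, List.nil_append, List.singleton_append,
      List.foldl_cons]
    have hset : ∀ (X : List (List Int)) (b : Nat) (v : Int),
        pvSet2 X (i : Int) (b : Int) v = X.set i ((X.getD i []).set b v) := by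
      intro X b v; simp [pvSet2]
    rw [hset]
    set v := pvM ((res.getD i []).getD k 0) s with hv
    set X := (res.getD i []).set k v with hX
    have hlen' : i < (res.set i X).length := by simpa using hi
    have hgd : (res.set i X).getD i [] = X := by
      rw [List.getD_eq_getElem _ [] hlen']
      exact List.getElem_set_self _
    rw [ih (pvM s (g.getD k 0)) (res.set i X) hlen'
          (by rw [hgd, hX]; simpa [List.length_set] using Nat.le_of_lt hkr) (Nat.le_of_lt hkg)]
    rw [hgd, List.set_set, hX]
    have h1 : ((res.getD i []).set k v).take k = (res.getD i []).take k := by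
      rw [List.take_set, List.set_eq_of_length_le (by simp)]
    have h2 : ((res.getD i []).set k v).drop k = v :: (res.getD i []).drop (k+1) := by
      rw [List.drop_set, if_neg (by omega), Nat.sub_self,
        List.drop_eq_getElem_cons hkr, List.set_cons_zero]
    have ht : List.take (k+1) g = List.take k g ++ [g[k]] := by
      rw [List.take_add_one, List.getElem?_eq_getElem hkg]; simp
    have htr : List.take (k+1) (res.getD i []) = List.take k (res.getD i []) ++ [(res.getD i [])[k]] := by
      rw [List.take_add_one, List.getElem?_eq_getElem hkr]; simp
    rw [h1, h2, ht, htr, pvSufRow_append _ _ _ _ _ htakelen]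
    have h3 : pvSufP s (List.take k g ++ [g[k]]) = pvSufP (pvM s g[k]) (List.take k g) := by
      rw [pvSufP_append]; rfl
    rw [h3]
    have hkr2 : k < res[i].length := by
      have h := hkr; rwa [List.getD_eq_getElem res [] hi] at h
    simp [hv, List.getElem?_eq_getElem hkg, List.getElem?_eq_getElem hkr2,
      List.getElem?_eq_getElem hi]

theorem pvPreRowsL_append (p : Int) (xs : List (List Int)) (g : List Int) :
    pvPreRowsL p (xs ++ [g]) = pvPreRowsL p xs ++ [pvWrite (pvPreP p xs.flatten) g] := by
  induction xs generalizing p with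
  | nil => simp [pvPreRowsL, pvPreP]
  | cons y ys ih => simp [pvPreRowsL, ih, pvPreP_append]

theorem pvSufRows_append (s : Int) (xs vs : List (List Int)) (g r : List Int)
    (h : xs.length = vs.length) :
    pvSufRows s (xs ++ [g]) (vs ++ [r]) =
      ((pvSufRows (pvSufRow s g r).2 xs vs).1 ++ [(pvSufRow s g r).1],
       (pvSufRows (pvSufRow s g r).2 xs vs).2) := by
  induction xs generalizing vs with
  | nil =>
    cases vs with
    | nil => simp [pvSufRows]
    | cons _ _ => simp at h
  | cons y ys ih =>
    cases vs with
    | nil => simp at h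
    | cons w ws =>
      simp only [List.length_cons, Nat.add_right_cancel_iff] at h
      simp [pvSufRows, ih ws h]

theorem pvPreRowsL_length (p : Int) (G : List (List Int)) :
    (pvPreRowsL p G).length = G.length := by
  induction G generalizing p with
  | nil => rfl
  | cons g gs ih => simp [pvPreRowsL, ih]

-- helper: read / write the row just after a prefix of the result list
theorem pv_getD_mid (A : List (List Int)) (x : List Int) (C : List (List Int)) :
    (A ++ x :: C).getD A.length [] = x := by
  rw [List.getD_eq_getElem _ [] (by simp)]
  rw [List.getElem_append_right (le_refl A.length)]
  simp

theorem pv_set_mid (A : List (List Int)) (x v : List Int) (C : List (List Int)) :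
    (A ++ x :: C).set A.length v = A ++ v :: C := by
  rw [List.set_append_right _ _ (le_refl A.length), Nat.sub_self, List.set_cons_zero]

-- outer prefix pass invariant (rows 0..k-1 written)
theorem pv_outerPre (grid : List (List Int)) (n : Nat)
    (hn : ∀ r ∈ grid, n ≤ r.length) (k : Nat) (hk : k ≤ grid.length) :
    (List.range k).foldl
      (fun st (i : Nat) =>
        (List.range n).foldl
          (fun (st : List (List Int) × Int) (j : Nat) =>
            (pvSet2 st.1 (i : Int) (j : Int) st.2,
             pvM st.2 ((grid.getD i []).getD j 0))) st)
      (List.replicate grid.length (List.replicate n 1), 1)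
    = (pvPreRowsL 1 ((pvG grid n).take k)
         ++ List.replicate (grid.length - k) (List.replicate n 1),
       pvPreP 1 (((pvG grid n).take k).flatten)) := by
  induction k with
  | zero => simp [pvPreRowsL, pvPreP]
  | succ k ih =>
    have hk' : k ≤ grid.length := by omega
    have hklt : k < grid.length := hk
    rw [List.range_succ, List.foldl_append, ih hk', List.foldl_cons, List.foldl_nil]
    have hRL : (pvPreRowsL 1 ((pvG grid n).take k)).length = k := by
      rw [pvPreRowsL_length, List.length_take]; simp only [pvG, List.length_map]; omega
    have hrep : List.replicate (grid.length - k) (List.replicate n (1:Int))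
        = List.replicate n (1:Int) :: List.replicate (grid.length - k - 1) (List.replicate n (1:Int)) := by
      conv_lhs => rw [show grid.length - k = (grid.length - k - 1) + 1 by omega]
      rw [List.replicate_succ]
    set A := pvPreRowsL 1 ((pvG grid n).take k) with hA
    set g := grid.getD k [] with hg
    have hgmem : g ∈ grid := by
      rw [hg, List.getD_eq_getElem grid [] hklt]; exact List.getElem_mem hklt
    have hng : n ≤ g.length := hn g hgmem
    rw [hrep]
    have hi : k < (A ++ List.replicate n (1:Int) :: List.replicate (grid.length - k - 1) (List.replicate n (1:Int))).length := by
      simp [hRL]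
    have hgd : (A ++ List.replicate n (1:Int) :: List.replicate (grid.length - k - 1) (List.replicate n (1:Int))).getD k []
        = List.replicate n (1:Int) := by
      rw [← hRL]; exact pv_getD_mid A _ _
    rw [pv_innerPre g _ _ k hi n (by rw [hgd]; simp) hng]
    rw [hgd]
    have hdrop : (List.replicate n (1:Int)).drop n = [] := by simp
    rw [hdrop, List.append_nil]
    set v := pvWrite (pvPreP 1 ((pvG grid n).take k).flatten) (g.take n) with hv
    have hsm : (A ++ List.replicate n (1:Int) :: List.replicate (grid.length - k - 1) (List.replicate n (1:Int))).set k v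
        = A ++ v :: List.replicate (grid.length - k - 1) (List.replicate n (1:Int)) := by
      rw [← hRL]; exact pv_set_mid _ _ _ _
    rw [hsm]
    have htk : (pvG grid n).take (k + 1) = (pvG grid n).take k ++ [g.take n] := by
      rw [List.take_add_one, List.getElem?_eq_getElem (by simpa [pvG] using hklt)]
      simp [pvG, List.getElem_map, hg, List.getElem?_eq_getElem hklt]
    rw [htk, pvPreRowsL_append, List.flatten_append, pvPreP_append, Prod.mk.injEq]
    constructor
    · rw [hA]
      have : grid.length - (k + 1) = grid.length - k - 1 := by omega
      rw [this]
      simp [hv, pvPreP]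
    · simp [pvPreP]

-- outer suffix pass invariant, stated over a suffix block of rows
theorem pv_outerSuf (grid : List (List Int)) (n : Nat)
    (gs : List (List Int)) :
    ∀ (rs pre post : List (List Int)) (s : Int),
    (∀ idx, idx < gs.length → grid.getD (pre.length + idx) [] = gs.getD idx []) →
    gs.length = rs.length →
    (∀ r ∈ rs, r.length = n) →
    (∀ r ∈ gs, n ≤ r.length) →
    ((List.range' pre.length gs.length).reverse).foldl
      (fun st (i : Nat) =>
        ((List.range n).reverse).foldl
          (fun (st : List (List Int) × Int) (j : Nat) =>
            (pvSet2 st.1 (i : Int) (j : Int) (pvM ((st.1.getD i []).getD j 0) st.2),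
             pvM st.2 ((grid.getD i []).getD j 0))) st)
      (pre ++ rs ++ post, s)
    = (pre ++ (pvSufRows s (gs.map (fun r => r.take n)) rs).1 ++ post,
       pvSufP s ((gs.map (fun r => r.take n)).flatten)) := by
  induction gs using List.reverseRecOn with
  | nil =>
    intro rs pre post s _ hlen _ _
    have : rs = [] := List.eq_nil_of_length_eq_zero (by simpa using hlen.symm)
    subst this
    simp [pvSufRows, pvSufP]
  | append_singleton gs g ih =>
    intro rs pre post s hidx hlen hr hg
    have hrs : rs ≠ [] := by intro h; subst h; simp at hlen
    obtain ⟨rs', r, hrseq⟩ : ∃ rs' r, rs = rs' ++ [r] :=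
      ⟨rs.dropLast, rs.getLast hrs, (List.dropLast_append_getLast hrs).symm⟩
    subst hrseq
    have hlen' : gs.length = rs'.length := by simpa using hlen
    have hrng : List.range' pre.length (gs ++ [g]).length
        = List.range' pre.length gs.length ++ [pre.length + gs.length] := by
      rw [List.length_append, List.length_cons, List.length_nil]
      rw [← List.range'_append_1]
      simp [List.range'_succ]
    rw [hrng, List.reverse_append, List.reverse_singleton, List.singleton_append,
      List.foldl_cons]
    -- the first processed row: absolute index pre.length + gs.length, current row r
    have hgg : grid.getD (pre.length + gs.length) [] = g := by
      have := hidx gs.length (by simp)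
      simpa [hlen'] using this
    have hrlen : r.length = n := hr r (by simp)
    have hglen : n ≤ g.length := hg g (by simp)
    have hmid : pre ++ (rs' ++ [r]) ++ post = (pre ++ rs') ++ r :: post := by simp
    have hilen : pre.length + gs.length = (pre ++ rs').length := by
      simp [hlen']
    rw [hmid, hgg, hilen]
    have hgd : ((pre ++ rs') ++ r :: post).getD (pre ++ rs').length [] = r :=
      pv_getD_mid _ _ _
    rw [pv_innerSuf g s ((pre ++ rs') ++ r :: post) (pre ++ rs').length
      (by simp) n (by rw [hgd, hrlen]) hglen, hgd]
    have hrtk : r.take n = r := List.take_of_length_le (le_of_eq hrlen)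
    have hrdp : r.drop n = [] := List.drop_eq_nil_of_le (le_of_eq hrlen)
    rw [hrtk, hrdp, List.append_nil, pv_set_mid]
    have hassoc : (pre ++ rs') ++ (pvSufRow s (g.take n) r).1 :: post
        = pre ++ rs' ++ ((pvSufRow s (g.take n) r).1 :: post) := by simp
    rw [hassoc]
    rw [ih rs' pre ((pvSufRow s (g.take n) r).1 :: post) (pvSufP s (g.take n))
      (fun idx hidx' => by
        rw [hidx idx (by simp; omega), List.getD_append _ _ _ _ hidx'])
      hlen' (fun x hx => hr x (by simp [hx]))
      (fun x hx => hg x (by simp [hx]))]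
    have hmap : (gs ++ [g]).map (fun r => r.take n)
        = gs.map (fun r => r.take n) ++ [g.take n] := by simp
    have hsnd : (pvSufRow s (g.take n) r).2 = pvSufP s (g.take n) := by
      apply pvSufRow_snd
      rw [List.length_take, hrlen]; omega
    rw [hmap, pvSufRows_append _ _ _ _ _ (by simpa using hlen'), hsnd,
      List.flatten_append, pvSufP_append]
    simp [pvSufP]

-- ===== flattening arithmetic =====

theorem pv_flat_take (G : List (List Int)) (n : Nat) (hG : ∀ r ∈ G, r.length = n)
    (i j : Nat) (hi : i < G.length) (hj : j ≤ n) :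
    G.flatten.take (i * n + j) = ((G.take i).flatten) ++ (G.getD i []).take j := by
  induction G generalizing i with
  | nil => simp at hi
  | cons r G ih =>
    cases i with
    | zero =>
      have hr : r.length = n := hG r (by simp)
      simp [List.flatten_cons, List.take_append_of_le_length (by omega : j ≤ r.length)]
    | succ i =>
      have hr : r.length = n := hG r (by simp)
      have harith : (i + 1) * n + j = r.length + (i * n + j) := by rw [hr]; ring
      rw [List.flatten_cons, harith, List.take_length_add_append,
        ih (fun a ha => hG a (by simp [ha])) i (by simpa using hi)]
      simp

theorem pv_flat_drop (G : List (List Int)) (n : Nat) (hG : ∀ r ∈ G, r.length = n)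
    (i j : Nat) (hi : i < G.length) (hj : j < n) :
    G.flatten.drop (i * n + j + 1) = (G.getD i []).drop (j + 1) ++ ((G.drop (i + 1)).flatten) := by
  induction G generalizing i with
  | nil => simp at hi
  | cons r G ih =>
    cases i with
    | zero =>
      have hr : r.length = n := hG r (by simp)
      simp [List.flatten_cons, List.drop_append_of_le_length (by omega : j + 1 ≤ r.length)]
    | succ i =>
      have hr : r.length = n := hG r (by simp)
      have harith : (i + 1) * n + j + 1 = r.length + (i * n + j + 1) := by rw [hr]; ring
      rw [List.flatten_cons, harith, List.drop_length_add_append,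
        ih (fun a ha => hG a (by simp [ha])) i (by simpa using hi)]
      simp

-- ===== modular-arithmetic bridge =====

theorem pvM_bounds (a b : Int) : 0 ≤ pvM a b ∧ pvM a b < 12345 := by
  exact ⟨PySem.Int.mod_nonneg _ (by norm_num), PySem.Int.mod_lt _ (by norm_num)⟩

theorem pvM_emod (a b : Int) : pvM a b = (a * b) % 12345 := by
  rw [pvM, PySem.Int.mod_eq_emod_of_pos (by norm_num : (0:Int) < 12345)]

theorem pvPreP_cong (p : Int) (xs : List Int) :
    pvPreP p xs % 12345 = (p * xs.prod) % 12345 := by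
  induction xs generalizing p with
  | nil => simp [pvPreP]
  | cons x xs ih =>
    simp only [pvPreP, List.foldl_cons] at *
    rw [ih, List.prod_cons, pvM_emod, Int.mul_emod, Int.emod_emod_of_dvd _ (by norm_num),
      ← Int.mul_emod, mul_assoc]

theorem pvSufP_cong (s : Int) (xs : List Int) :
    pvSufP s xs % 12345 = (s * xs.prod) % 12345 := by
  induction xs with
  | nil => simp [pvSufP]
  | cons x xs ih =>
    simp only [pvSufP, List.foldr_cons] at *
    rw [pvM_emod, List.prod_cons, Int.mul_emod, ih, ← Int.mul_emod]
    rw [show s * (x * xs.prod) = s * xs.prod * x by ring, Int.emod_emod_of_dvd _ (by norm_num)]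

theorem pvPreP_bounds (p : Int) (xs : List Int) (h : xs ≠ []) :
    0 ≤ pvPreP p xs ∧ pvPreP p xs < 12345 := by
  induction xs generalizing p with
  | nil => simp at h
  | cons x xs ih =>
    cases xs with
    | nil => simpa [pvPreP] using pvM_bounds p x
    | cons y ys => simpa [pvPreP] using ih (pvM p x) (by simp)

theorem pv_mul_suf_emod (p : Int) (Y : List Int) :
    (p * pvSufP 1 Y) % 12345 = (p * Y.prod) % 12345 := by
  rw [Int.mul_emod, pvSufP_cong, one_mul, ← Int.mul_emod]

theorem pv_bridge (X Y : List Int) :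
    pvM (pvPreP 1 X) (pvSufP 1 Y) = pvPreP (pvPreP 1 X) Y := by
  cases Y with
  | nil =>
    simp only [pvSufP, List.foldr_nil, pvPreP, List.foldl_nil]
    cases X with
    | nil => decide
    | cons x xs =>
      have hb := pvPreP_bounds 1 (x :: xs) (by simp)
      rw [pvM_emod, mul_one]
      exact Int.emod_eq_of_lt hb.1 hb.2
  | cons y ys =>
    have hL := pvM_bounds (pvPreP 1 X) (pvSufP 1 (y :: ys))
    have hR := pvPreP_bounds (pvPreP 1 X) (y :: ys) (by simp)
    have hmod : pvM (pvPreP 1 X) (pvSufP 1 (y :: ys)) % 12345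
        = pvPreP (pvPreP 1 X) (y :: ys) % 12345 := by
      rw [pvM_emod, Int.emod_emod_of_dvd _ (by norm_num), pv_mul_suf_emod, pvPreP_cong]
    calc pvM (pvPreP 1 X) (pvSufP 1 (y :: ys))
        = pvM (pvPreP 1 X) (pvSufP 1 (y :: ys)) % 12345 := (Int.emod_eq_of_lt hL.1 hL.2).symm
      _ = pvPreP (pvPreP 1 X) (y :: ys) % 12345 := hmod
      _ = pvPreP (pvPreP 1 X) (y :: ys) := Int.emod_eq_of_lt hR.1 hR.2

-- B's skip-fold computes the product of all other elements
theorem pv_foldl_range' (xs : List Int) (k : Nat) (a c : Nat) (p : Int)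
    (hk : k ∉ List.range' a c) (hac : a + c ≤ xs.length) :
    (List.range' a c).foldl (fun p t => if t = k then p else pvM p (xs.getD t 0)) p
      = pvPreP p ((xs.drop a).take c) := by
  induction c generalizing a p with
  | zero => simp [pvPreP]
  | succ c ih =>
    have ha : a < xs.length := by omega
    rw [List.range'_succ, List.foldl_cons,
      List.drop_eq_getElem_cons ha, List.take_succ_cons]
    have hne : a ≠ k := by
      intro h; subst h; exact hk (by simp [List.mem_range'_1])
    rw [if_neg hne]
    have hget : xs.getD a 0 = xs[a] := List.getD_eq_getElem xs 0 ha
    rw [hget, ih (a + 1) (pvM p xs[a])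
      (by simp only [List.mem_range'_1] at hk ⊢; omega) (by omega)]
    simp [pvPreP]

theorem pv_skipfold (xs : List Int) (k : Nat) (hk : k < xs.length) :
    (List.range xs.length).foldl
      (fun p t => if t = k then p else pvM p (xs.getD t 0)) 1
    = pvPreP 1 (xs.take k ++ xs.drop (k + 1)) := by
  have hsplit : List.range xs.length
      = List.range' 0 k ++ (k :: List.range' (k + 1) (xs.length - k - 1)) := by
    rw [List.range_eq_range']
    rw [show xs.length = k + (xs.length - k - 1 + 1) by omega, ← List.range'_append_1]
    simp [List.range'_succ]
  rw [hsplit, List.foldl_append, pv_foldl_range' xs k 0 k 1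
    (by simp [List.mem_range'_1]) (by omega), List.foldl_cons, if_pos rfl,
    pv_foldl_range' xs k (k + 1) (xs.length - k - 1)  _
    (by simp [List.mem_range'_1]) (by omega)]
  rw [List.drop_zero, pvPreP_append]
  congr 1
  rw [List.take_of_length_le (by simp; omega)]

-- ===== index forms and small helpers for the final assembly =====

theorem pvPreRowsL_idx (p : Int) (G : List (List Int)) :
    pvPreRowsL p G = (List.range G.length).map
      (fun i => pvWrite (pvPreP p ((G.take i).flatten)) (G.getD i [])) := by
  induction G generalizing p with
  | nil => simp [pvPreRowsL]
  | cons g gs ih =>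
    rw [pvPreRowsL, List.length_cons, List.range_succ_eq_map, List.map_cons, List.map_map]
    refine List.cons_eq_cons.mpr ⟨by simp [pvPreP], ?_⟩
    rw [ih]
    apply List.map_congr_left
    intro i _
    simp [Function.comp, List.take_succ_cons, List.flatten_cons, pvPreP_append]

theorem pvSufRows_snd_eq (s : Int) (G R : List (List Int))
    (hlen : G.length = R.length)
    (hrows : ∀ i, i < G.length → (G.getD i []).length ≤ (R.getD i []).length) :
    (pvSufRows s G R).2 = pvSufP s G.flatten := by
  induction G generalizing R s with
  | nil =>
    have : R = [] := List.eq_nil_of_length_eq_zero (by simpa using hlen.symm)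
    subst this
    simp [pvSufRows, pvSufP]
  | cons g gs ih =>
    cases R with
    | nil => simp at hlen
    | cons r rs =>
      have h0 := hrows 0 (by simp)
      simp only [List.getD_cons_zero] at h0
      rw [pvSufRows]
      have hq : (pvSufRows s gs rs).2 = pvSufP s gs.flatten :=
        ih s rs (by simpa using hlen) (fun i hi => by simpa using hrows (i+1) (by simpa using hi))
      simp only [hq]
      rw [pvSufRow_snd _ _ _ h0, List.flatten_cons, pvSufP_append]

theorem pvSufRows_fst_idx (s : Int) (G R : List (List Int))
    (hlen : G.length = R.length)
    (hrows : ∀ i, i < G.length → (G.getD i []).length ≤ (R.getD i []).length) :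
    (pvSufRows s G R).1 = (List.range G.length).map
      (fun i => (pvSufRow (pvSufP s ((G.drop (i+1)).flatten)) (G.getD i []) (R.getD i [])).1) := by
  induction G generalizing R s with
  | nil =>
    have : R = [] := List.eq_nil_of_length_eq_zero (by simpa using hlen.symm)
    subst this
    simp [pvSufRows]
  | cons g gs ih =>
    cases R with
    | nil => simp at hlen
    | cons r rs =>
      have hlen' : gs.length = rs.length := by simpa using hlen
      have hrows' : ∀ i, i < gs.length → (gs.getD i []).length ≤ (rs.getD i []).length :=
        fun i hi => by simpa using hrows (i+1) (by simpa using hi)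
      rw [pvSufRows, List.length_cons, List.range_succ_eq_map, List.map_cons, List.map_map]
      refine List.cons_eq_cons.mpr ⟨?_, ?_⟩
      · simp only [List.drop_succ_cons, List.drop_zero, List.getD_cons_zero]
        rw [pvSufRows_snd_eq s gs rs hlen' hrows']
      · rw [ih s rs hlen' hrows']
        apply List.map_congr_left
        intro i _
        simp [Function.comp]

theorem pvRow_eq (g : List Int) : ∀ (p s : Int),
    List.zipWith pvM (pvWrite p g) (pvT s g)
      = (List.range g.length).map
          (fun j => pvM (pvPreP p (g.take j)) (pvSufP s (g.drop (j+1)))) := by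
  induction g with
  | nil => intro p s; simp [pvWrite, pvT]
  | cons x xs ih =>
    intro p s
    rw [pvWrite, pvT, List.zipWith_cons_cons, List.length_cons, List.range_succ_eq_map,
      List.map_cons, List.map_map]
    refine List.cons_eq_cons.mpr ⟨by simp [pvPreP], ?_⟩
    rw [ih (pvM p x) s]
    apply List.map_congr_left
    intro j _
    simp [Function.comp, pvPreP, List.take_succ_cons]

theorem pv_map_range_getD_id (l : List (List Int)) :
    (List.range l.length).map (fun i => l.getD i []) = l := by
  apply List.ext_getElem (by simp)
  intro i h1 h2
  have h2' : i < l.length := by simpa using h2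
  simp [List.getD, List.getElem?_eq_getElem h2']

theorem pv_row_take (r : List Int) (n : Nat) (h : n ≤ r.length) :
    (List.range n).map (fun j => r.getD j 0) = r.take n := by
  apply List.ext_getElem (by simp [h])
  intro i h1 h2
  have hi : i < n := by simpa using h1
  have hir : i < r.length := by omega
  simp [List.getD, List.getElem?_eq_getElem hir]

theorem pv_flat_len (G : List (List Int)) (n : Nat) (h : ∀ r ∈ G, r.length = n) :
    G.flatten.length = G.length * n := by
  induction G with
  | nil => simp
  | cons g gs ih =>
    have := h g (by simp)
    simp only [List.flatten_cons, List.length_append, List.length_cons,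
      ih (fun r hr => h r (by simp [hr])), this]
    ring

theorem pv_idx_lt (i j m n : Nat) (hi : i < m) (hj : j < n) : i * n + j < m * n :=
  calc i * n + j < i * n + n := by omega
    _ = (i + 1) * n := by ring
    _ ≤ m * n := Nat.mul_le_mul_right n hi

-- pyRange 0 N 1 over a Nat bound, as a mapped List.range
theorem pv_range_cast (N : Nat) :
    PySem.List.pyRange 0 (N : Int) 1 = (List.range N).map (fun (k : Nat) => (k : Int)) := by
  rw [PySem.List.pyRange_one]
  norm_num

theorem pv_foldl_pyRange_nat {β : Type} (N : Nat) (f : β → Int → β) (b : β) :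
    (PySem.List.pyRange 0 (N : Int) 1).foldl f b
      = (List.range N).foldl (fun acc (k : Nat) => f acc (k : Int)) b := by
  rw [pv_range_cast, List.foldl_map]

theorem pv_foldl_pyRange_rev {β : Type} (N : Nat) (f : β → Int → β) (b : β) :
    ((PySem.List.pyRange 0 (N : Int) 1).reverse).foldl f b
      = ((List.range N).reverse).foldl (fun acc (k : Nat) => f acc (k : Int)) b := by
  rw [pv_range_cast, ← List.map_reverse, List.foldl_map]

-- ===== VERDICT (by name: the statement is the Claim_ definition above) =====
theorem constructProductMatrixV1_spec : Claim_equal_constructProductMatrixV1 := by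
  unfold Claim_equal_constructProductMatrixV1
  intro grid _ hpre
  unfold Spec_constructProductMatrixV1
  obtain ⟨hgne, hn⟩ := hpre
  set n := (grid.headD []).length with hndef
  set m := grid.length with hmdef
  set G := pvG grid n with hGdef
  have hGlen : G.length = m := by simp [hGdef, pvG, hmdef]
  have hGrow : ∀ r ∈ G, r.length = n := by
    intro r hr
    obtain ⟨x, hx, rfl⟩ := List.mem_map.mp hr
    rw [List.length_take]
    exact Nat.min_eq_left (hn x hx)
  have hGget : ∀ i, i < m → G.getD i [] = (grid.getD i []).take n := by
    intro i him
    rw [hGdef, pvG, List.getD_eq_getElem _ [] (by simpa using him), List.getElem_map,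
      List.getD_eq_getElem grid [] him]
  have hGgetlen : ∀ i, i < m → (G.getD i []).length = n := by
    intro i him
    have hiG : i < G.length := by omega
    rw [List.getD_eq_getElem G [] hiG]
    exact hGrow _ (List.getElem_mem hiG)
  have hFlen : G.flatten.length = m * n := by rw [pv_flat_len G n hGrow, hGlen]
  -- ===== the A side: two passes → per-cell prefix*suffix over the flattening =====
  have e1 := pv_outerPre grid n hn m (le_refl m)
  have hGtake : G.take m = G := List.take_of_length_le (le_of_eq hGlen)
  rw [hGtake, show grid.length - m = 0 by omega, List.replicate_zero, List.append_nil] at e1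
  simp only [pvM] at e1
  have hRlen : (pvPreRowsL 1 G).length = m := by rw [pvPreRowsL_length, hGlen]
  have hRget : ∀ i, i < m → (pvPreRowsL 1 G).getD i []
      = pvWrite (pvPreP 1 ((G.take i).flatten)) (G.getD i []) := by
    intro i hi
    rw [pvPreRowsL_idx, List.getD_eq_getElem _ [] (by simp [hGlen]; omega),
      List.getElem_map, List.getElem_range]
  have e2 := pv_outerSuf grid n grid (pvPreRowsL 1 G) [] [] 1
    (by intro idx _; simp)
    (by rw [hRlen, hmdef])
    (by intro r hr
        rw [pvPreRowsL_idx] at hr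
        obtain ⟨i, hi, rfl⟩ := List.mem_map.mp hr
        rw [List.mem_range, hGlen] at hi
        rw [pvWrite_length]
        exact hGgetlen i hi)
    hn
  simp only [List.length_nil, List.nil_append, List.append_nil] at e2
  rw [← List.range_eq_range'] at e2
  simp only [pvM] at e2
  have hmapG : grid.map (fun r => r.take n) = G := rfl
  rw [hmapG] at e2
  have hA0 : constructProductMatrixV1 grid = (pvSufRows 1 G (pvPreRowsL 1 G)).1 := by
    unfold constructProductMatrixV1
    simp only [pv_foldl_pyRange_nat, pv_foldl_pyRange_rev, PySem.List.pyGetD_natCast]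
    rw [e1]
    rw [e2]
  have hA : constructProductMatrixV1 grid
      = (List.range m).map (fun i => (List.range n).map (fun j =>
          pvM (pvPreP 1 (G.flatten.take (i * n + j)))
              (pvSufP 1 (G.flatten.drop (i * n + j + 1))))) := by
    rw [hA0, pvSufRows_fst_idx 1 G (pvPreRowsL 1 G) (by rw [hRlen, hGlen])
      (fun i hi => by rw [hRget i (by omega), pvWrite_length]), hGlen]
    apply List.map_congr_left
    intro i hi
    rw [List.mem_range] at hi
    have hiG : i < G.length := by omega
    rw [hRget i hi, pvSufRow_zip _ _ _ (by rw [pvWrite_length]), pvRow_eq, hGgetlen i hi]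
    apply List.map_congr_left
    intro j hj
    rw [List.mem_range] at hj
    rw [← pvPreP_append, ← pvSufP_append,
      pv_flat_take G n hGrow i j hiG (le_of_lt hj),
      pv_flat_drop G n hGrow i j hiG hj]
  -- ===== the B side: the brute-force skip-fold over the same flattening =====
  have harr : (PySem.List.pyRange 0 (grid.length : Int) 1).flatMap (fun i =>
      (PySem.List.pyRange 0 ((grid.headD []).length : Int) 1).map
        (fun j => PySem.List.pyGetD (PySem.List.pyGetD grid i []) j 0)) = G.flatten := by
    rw [pv_range_cast, pv_range_cast, List.flatMap_map, List.flatMap_def]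
    have hrow : ∀ i ∈ List.range grid.length,
        ((List.range (grid.headD []).length).map (fun (k : Nat) => (k : Int))).map
          (fun j => PySem.List.pyGetD (PySem.List.pyGetD grid (i : Int) []) j 0)
        = G.getD i [] := by
      intro i hi
      rw [List.mem_range] at hi
      rw [List.map_map]
      have hcast : ((fun j => PySem.List.pyGetD (PySem.List.pyGetD grid (i : Int) []) j 0)
          ∘ (fun (k : Nat) => (k : Int))) = (fun j : Nat => (grid.getD i []).getD j 0) := by
        funext j; simp
      rw [hcast, pv_row_take _ n (by
        apply hn
        rw [List.getD_eq_getElem grid [] hi]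
        exact List.getElem_mem hi), hGget i hi]
    rw [List.map_congr_left hrow, show grid.length = G.length from by rw [hGlen],
      pv_map_range_getD_id]
  have hB : constructProductMatrixV1_alt grid
      = (List.range m).map (fun i => (List.range n).map (fun j =>
          pvPreP 1 (G.flatten.take (i * n + j) ++ G.flatten.drop (i * n + j + 1)))) := by
    unfold constructProductMatrixV1_alt
    dsimp only
    rw [harr]
    simp only [pv_foldl_pyRange_nat, PySem.List.foldl_append_singleton_eq_map,
      List.nil_append]
    apply List.map_congr_left
    intro i hi
    rw [List.mem_range] at hi
    apply List.map_congr_left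
    intro j hj
    rw [List.mem_range] at hj
    have hLcast : ((grid.length : Int) * ((grid.headD []).length : Int)) = ((m * n : Nat) : Int) := by
      push_cast; rfl
    rw [hLcast, pv_range_cast, List.foldl_map]
    have hbody : (fun (p : Int) (t : Nat) =>
        if (t : Int) ≠ (i : Int) * (n : Int) + (j : Int)
        then PySem.Int.mod (p * PySem.List.pyGetD G.flatten (t : Int) 0) 12345 else p)
        = (fun (p : Int) (t : Nat) =>
            if t = i * n + j then p else pvM p (G.flatten.getD t 0)) := by
      funext p t
      have hiff : ((t : Int) = (i : Int) * (n : Int) + (j : Int)) ↔ (t = i * n + j) := by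
        exact_mod_cast Iff.rfl
      simp [ne_eq, hiff, ite_not, pvM]
    rw [hbody, ← hFlen, pv_skipfold G.flatten (i * n + j)
      (by rw [hFlen]; exact pv_idx_lt i j m n hi hj)]
  -- ===== combine: the modular bridge per cell =====
  rw [hA, hB]
  apply List.map_congr_left
  intro i _
  apply List.map_congr_left
  intro j _
  rw [pv_bridge, pvPreP_append]
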